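-- pv_equiv track=rewrite | github.com/schism-dev/schism | src/Utility/Grid_Scripts/Compound_flooding/RiverMapGen/river_map_tif_preproc.py | parse_dem_tiles
-- ===== SOURCE A (Python) =====
-- import math
--
-- def parse_dem_tiles(dem_code, dem_tile_digits):
--     if dem_code == 0:
--         return [-1]  # no DEM found
--
--     dem_tile_ids = []
--     n_tiles = int(math.log10(dem_code)/dem_tile_digits) + 1
--     if n_tiles > 4:
--         raise Exception("Some thalweg points belong to more than 4 tiles from one DEM source, clean up the DEM tiles first.")
--     for digit in reversed(range(n_tiles)):
--         x, dem_code = divmod(dem_code, 10**(digit*dem_tile_digits))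
--         dem_tile_ids.append(int(x-1))
--     return dem_tile_ids
-- ===== SOURCE B (Python) =====
-- def parse_dem_tiles(dem_code, dem_tile_digits):
--     if dem_code == 0:
--         return [-1]  # no DEM found
--
--     nd = 0
--     t = dem_code
--     while t:
--         nd += 1
--         t //= 10
--     # never build a modulus wider than the code itself (a single group needs no bigger one)
--     base = 10 ** min(dem_tile_digits, nd)
--     dem_tile_ids = []
--     while dem_code:
--         dem_code, r = divmod(dem_code, base)
--         dem_tile_ids.append(r - 1)
--     if len(dem_tile_ids) > 4:
--         raise Exception("Some thalweg points belong to more than 4 tiles from one DEM source, clean up the DEM tiles first.")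
--     dem_tile_ids.reverse()
--     return dem_tile_ids
-- ===== Notes on version B (the rewrite author's own statement) =====
-- stated objective: simpler
-- what changed: Replaces the float log10 tile-count plus MSB-first divmod by varying powers 10**(digit*d) with a plain while-loop that extracts id groups LSB-first by repeated divmod by a constant base 10**min(d, digit count), building the list back-to-front and reversing it; no math import.
-- outside the precondition, e.g. on parse_dem_tiles(3, -1): A returns [2], B does not finish within the time limit
import Mathlib
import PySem

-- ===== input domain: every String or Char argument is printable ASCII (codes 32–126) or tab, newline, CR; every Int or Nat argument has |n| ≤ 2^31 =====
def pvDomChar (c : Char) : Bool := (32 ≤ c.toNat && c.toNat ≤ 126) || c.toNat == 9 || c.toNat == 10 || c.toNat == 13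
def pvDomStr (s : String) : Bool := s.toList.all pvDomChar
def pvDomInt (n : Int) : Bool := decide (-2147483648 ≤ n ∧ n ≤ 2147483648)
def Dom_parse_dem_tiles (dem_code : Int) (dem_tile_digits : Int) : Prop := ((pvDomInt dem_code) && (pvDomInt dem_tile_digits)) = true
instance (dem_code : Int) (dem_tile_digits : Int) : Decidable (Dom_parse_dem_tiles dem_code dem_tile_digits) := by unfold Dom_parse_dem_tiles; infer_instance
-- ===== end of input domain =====

-- B decodes the packed tile ids LSB-first by repeated divmod by the constant 10**d and reverses,
-- instead of A's float-log10 tile count and MSB-first divmod by varying powers (objective: simpler).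


-- ===== PORT A =====

-- decimal digit count; for 1 ≤ n ≤ 2^31 (the Dom ∩ Pre_ inputs) pvNumDigits n - 1 = ⌊log10 n⌋, so together
-- with PySem.Int.floordiv (= int(x/y)-truncation on the nonnegative values reached here) the n_tiles line
-- below computes exactly A's `int(math.log10(dem_code)/dem_tile_digits) + 1` (float log10 is exact enough
-- below 2^31)
def pvNumDigits : Nat → Nat
  | 0 => 0
  | n + 1 => pvNumDigits ((n + 1) / 10) + 1
decreasing_by exact Nat.div_lt_self (Nat.succ_pos n) (by norm_num)

-- the `for digit in reversed(range(n_tiles))` loop of A, state = (dem_code, dem_tile_ids)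
def pvLoopA (dem_tile_digits : Int) : List Int → Int × List Int → Int × List Int
  | [], st => st
  | digit :: rest, st =>
    let m : Int := (10 : Int) ^ ((digit * dem_tile_digits).toNat)
    pvLoopA dem_tile_digits rest
      (PySem.Int.mod st.1 m, st.2 ++ [PySem.Int.floordiv st.1 m - 1])

def parse_dem_tiles (dem_code : Int) (dem_tile_digits : Int) : List Int :=
  if dem_code = 0 then [-1]  -- no DEM found
  else
    -- 10**(digit*dem_tile_digits) in the loop: the exponent is ≥ 0 on every input Pre_ admits (.toNat)
    let n_tiles : Int := PySem.Int.floordiv ((pvNumDigits dem_code.toNat : Int) - 1) dem_tile_digits + 1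
    if 4 < n_tiles then []   -- raise Exception(...): excluded by Pre_
    else (pvLoopA dem_tile_digits ((PySem.List.pyRange 0 n_tiles 1).reverse) (dem_code, [])).2

-- ===== PORT B =====

-- the digit-count `while t:` loop of B; Python's loop does not terminate for t < 0 (inputs Pre_
-- excludes), so the t < 0 guard only makes the same computation total
def pvCountB (t : Int) (nd : Int) : Int :=
  if t = 0 then nd
  else if t < 0 then nd
  else pvCountB (PySem.Int.floordiv t 10) (nd + 1)
termination_by t.toNat
decreasing_by
  rename_i h1 h2
  have hc : t = ((t.toNat : Nat) : Int) := by omega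
  rw [hc, show (10 : Int) = ((10 : Nat) : Int) from rfl, PySem.Int.floordiv_natCast]
  simp only [Int.toNat_natCast]
  exact Nat.div_lt_self (by omega) (by omega)

-- the `while dem_code:` loop of B; Python's loop does not terminate when base ≤ 1 or dem_code < 0
-- (inputs Pre_ excludes), so the second guard only makes the same computation total
def pvLoopB (base : Int) (code : Int) (acc : List Int) : List Int :=
  if code = 0 then acc
  else if base ≤ 1 ∨ code < 0 then acc
  else pvLoopB base (PySem.Int.floordiv code base) (acc ++ [PySem.Int.mod code base - 1])
termination_by code.toNat
decreasing_by
  rename_i h1 h2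
  have hc : code = ((code.toNat : Nat) : Int) := by omega
  have hbz : base = ((base.toNat : Nat) : Int) := by omega
  rw [hc, hbz, PySem.Int.floordiv_natCast]
  simp only [Int.toNat_natCast]
  exact Nat.div_lt_self (by omega) (by omega)

def parse_dem_tiles_alt (dem_code : Int) (dem_tile_digits : Int) : List Int :=
  if dem_code = 0 then [-1]  -- no DEM found
  else
    let nd : Int := pvCountB dem_code 0
    -- 10**min(...): the exponent is ≥ 1 on every input Pre_ admits (.toNat)
    let base : Int := (10 : Int) ^ ((min dem_tile_digits nd).toNat)
    let ids := pvLoopB base dem_code []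
    if 4 < (ids.length : Int) then []   -- raise Exception(...): excluded by Pre_
    else ids.reverse

-- ===== PRECONDITION & SPEC =====

-- Pre_ keeps the natural domain: dem_code = 0, or a positive packed code with a positive digit width d
-- whose decimal digit count is at most 4*d (at most 4 packed tiles).  Outside it A raises: the >4-tiles
-- Exception when the code has more than 4*d digits, ZeroDivisionError when d = 0, a math domain error
-- when dem_code < 0 — except for positive codes with NEGATIVE d, on which A still returns ([] or
-- [dem_code-1], an accident of float truncation toward zero) while B's loop never terminates: a negative
-- per-tile digit count is outside the function's natural domain.
-- the first disjunct of the last conjunct excludes nothing: whenever 10 ≤ 4*d, every dem_code in the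
-- |dem_code| ≤ 2^31 < 10^10 input domain Dom already satisfies dem_code < 10^(4*d)
def Pre_parse_dem_tiles (dem_code : Int) (dem_tile_digits : Int) : Prop :=
  dem_code = 0 ∨
    (1 ≤ dem_code ∧ 1 ≤ dem_tile_digits ∧
      (10 ≤ 4 * dem_tile_digits ∨ dem_code < (10 : Int) ^ ((4 * dem_tile_digits).toNat)))
instance (dem_code : Int) (dem_tile_digits : Int) : Decidable (Pre_parse_dem_tiles dem_code dem_tile_digits) := by
  unfold Pre_parse_dem_tiles; infer_instance

def pvWitness_parse_dem_tiles : Int × Int := (123456, 3)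

def Spec_parse_dem_tiles (dem_code : Int) (dem_tile_digits : Int) (out : List Int) : Prop := out = parse_dem_tiles_alt dem_code dem_tile_digits
instance (dem_code : Int) (dem_tile_digits : Int) (out : List Int) : Decidable (Spec_parse_dem_tiles dem_code dem_tile_digits out) := by unfold Spec_parse_dem_tiles; infer_instance

-- ===== CLAIM (what is proved, stated in full; the proofs are below) =====
def Claim_equal_parse_dem_tiles : Prop := ∀ (dem_code : Int) (dem_tile_digits : Int), Dom_parse_dem_tiles dem_code dem_tile_digits → Pre_parse_dem_tiles dem_code dem_tile_digits → Spec_parse_dem_tiles dem_code dem_tile_digits (parse_dem_tiles dem_code dem_tile_digits)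

-- ===== LEMMAS AND PROOFS =====

-- digit-count bounds: 10^(g-1) ≤ n < 10^g for n ≥ 1
theorem pvNumDigits_bounds : ∀ n : Nat, 1 ≤ n →
    10 ^ (pvNumDigits n - 1) ≤ n ∧ n < 10 ^ (pvNumDigits n) := by
  intro n
  induction n using Nat.strong_induction_on with
  | _ n ih =>
    intro hn
    obtain ⟨m, rfl⟩ : ∃ m, n = m + 1 := ⟨n - 1, by omega⟩
    rw [pvNumDigits]
    by_cases h10 : m + 1 < 10
    · have : (m + 1) / 10 = 0 := by omega
      rw [this]
      simp [pvNumDigits]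
      omega
    · have hq : 1 ≤ (m + 1) / 10 := by omega
      have ⟨ih1, ih2⟩ := ih ((m + 1) / 10) (Nat.div_lt_self (by omega) (by norm_num)) hq
      have hp : 1 ≤ pvNumDigits ((m + 1) / 10) := by
        by_contra hc
        have : pvNumDigits ((m + 1) / 10) = 0 := by omega
        rw [this] at ih2; omega
      constructor
      · have h1 : pvNumDigits ((m + 1) / 10) + 1 - 1 = (pvNumDigits ((m + 1) / 10) - 1) + 1 := by omega
        rw [h1, pow_succ]
        have := Nat.div_mul_le_self (m + 1) 10
        calc 10 ^ (pvNumDigits ((m+1)/10) - 1) * 10 ≤ ((m+1)/10) * 10 := by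
              exact Nat.mul_le_mul_right 10 ih1
          _ ≤ m + 1 := this
      · rw [pow_succ]
        exact (Nat.div_lt_iff_lt_mul (by norm_num)).mp ih2

-- B's digit-count loop agrees with pvNumDigits on the nonnegative codes Pre_ admits
theorem pvCountB_eq : ∀ (cn : Nat) (nd : Int), pvCountB (cn : Int) nd = nd + (pvNumDigits cn : Int) := by
  intro cn
  induction cn using Nat.strong_induction_on with
  | _ cn ih =>
    intro nd
    by_cases h0 : cn = 0
    · subst h0; rw [pvCountB]; simp [pvNumDigits]
    · rw [pvCountB, if_neg (by omega), if_neg (by omega)]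
      rw [show (10 : Int) = ((10 : Nat) : Int) from rfl, PySem.Int.floordiv_natCast]
      rw [ih (cn / 10) (Nat.div_lt_self (by omega) (by norm_num)) (nd + 1)]
      obtain ⟨m, rfl⟩ : ∃ m, cn = m + 1 := ⟨cn - 1, by omega⟩
      rw [pvNumDigits]
      push_cast; ring

-- digit-group juggling: the decimal digits of c % 10^e at positions a..a+b-1 (a+b ≤ e) are those of c
theorem pv_mod_pow_div_mod (c a b e : Nat) (h : a + b ≤ e) :
    (c % 10 ^ e) / 10 ^ a % 10 ^ b = c / 10 ^ a % 10 ^ b := by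
  set r := c % 10 ^ e with hr
  set q := c / 10 ^ e with hq
  have hc : c = r + q * 10 ^ e := by rw [hr, hq, Nat.mod_add_div']
  have he : q * 10 ^ e = (q * 10 ^ (e - a - b) * 10 ^ b) * 10 ^ a := by
    rw [mul_assoc, mul_assoc, ← pow_add, ← pow_add]; congr 2; omega
  conv_rhs => rw [hc, he]
  rw [Nat.add_mul_div_right _ _ (by positivity : 0 < 10 ^ a), Nat.add_mul_mod_self_right]

theorem pv_reverse_map_range (k : Nat) (f : Nat → Int) :
    ((List.range k).map f).reverse = (List.range k).map (fun i => f (k - 1 - i)) := by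
  apply List.ext_getElem (by simp)
  intro i h1 h2
  rw [List.getElem_reverse]
  simp only [List.getElem_map, List.getElem_range]
  congr 1
  simp

theorem pv_map_range_succ (f : Nat → Int) (n : Nat) :
    (List.range (n + 1)).map f = f 0 :: (List.range n).map (fun i => f (i + 1)) := by
  rw [List.range_succ_eq_map, List.map_cons, List.map_map]
  rfl

theorem pvLoopB_spec (bz : Nat) (hb : 2 ≤ bz) : ∀ (k : Nat) (cn : Nat) (acc : List Int),
    bz ^ k ≤ cn → cn < bz ^ (k + 1) →
    pvLoopB (bz : Int) (cn : Int) acc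
      = acc ++ (List.range (k + 1)).map (fun i => ((cn / bz ^ i % bz : Nat) : Int) - 1) := by
  intro k
  induction k with
  | zero =>
    intro cn acc h1 h2
    have h1' : 1 ≤ cn := by simpa using h1
    have h2' : cn < bz := by simpa using h2
    rw [pvLoopB]
    have hne : ¬ ((cn : Int) = 0) := by omega
    have hg : ¬ ((bz : Int) ≤ 1 ∨ (cn : Int) < 0) := by rintro (h | h) <;> omega
    rw [if_neg hne, if_neg hg, PySem.Int.floordiv_natCast, PySem.Int.mod_natCast]
    rw [Nat.div_eq_of_lt h2']
    rw [pvLoopB, if_pos (by norm_num)]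
    have hm : cn % bz = cn := Nat.mod_eq_of_lt h2'
    simp [hm]
    rw [← Int.natCast_mod, hm]
  | succ k ih =>
    intro cn acc h1 h2
    have hcn : 1 ≤ cn := le_trans (Nat.one_le_pow _ _ (by omega)) h1
    rw [pvLoopB]
    have hne : ¬ ((cn : Int) = 0) := by omega
    have hg : ¬ ((bz : Int) ≤ 1 ∨ (cn : Int) < 0) := by rintro (h | h) <;> omega
    rw [if_neg hne, if_neg hg, PySem.Int.floordiv_natCast, PySem.Int.mod_natCast]
    have hub : cn / bz < bz ^ (k + 1) := by
      rw [Nat.div_lt_iff_lt_mul (by omega), ← pow_succ]; exact h2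
    have hlb : bz ^ k ≤ cn / bz := by
      rw [Nat.le_div_iff_mul_le (by omega), ← pow_succ]; exact h1
    rw [ih (cn / bz) _ hlb hub, List.append_assoc]
    congr 1
    rw [pv_map_range_succ (fun i => ((cn / bz ^ i % bz : Nat) : Int) - 1) (k + 1),
        List.singleton_append]
    congr 1
    · simp
    · apply List.map_congr_left
      intro i _
      congr 3
      rw [pow_succ', Nat.div_div_eq_div_mul]

theorem pvLoopA_spec (d : Int) (hd : 1 ≤ d) : ∀ (k : Nat) (cn : Nat) (acc : List Int),
    cn < 10 ^ (d.toNat * k) →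
    (pvLoopA d ((PySem.List.pyRange 0 (k : Int) 1).reverse) ((cn : Int), acc)).2
      = acc ++ (List.range k).map
          (fun i => ((cn / 10 ^ (d.toNat * (k - 1 - i)) % 10 ^ d.toNat : Nat) : Int) - 1) := by
  intro k
  induction k with
  | zero =>
    intro cn acc _
    rw [PySem.List.pyRange_one_eq_nil (by norm_num)]
    simp [pvLoopA]
  | succ k ih =>
    intro cn acc hcn
    have hsplit : (PySem.List.pyRange 0 ((k + 1 : Nat) : Int) 1).reverse
        = (k : Int) :: (PySem.List.pyRange 0 (k : Int) 1).reverse := by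
      have h1 : ((k + 1 : Nat) : Int) = (k : Int) + 1 := by push_cast; ring
      rw [h1, PySem.List.pyRange_one_succ_right (by positivity), List.reverse_append]
      simp
    rw [hsplit, pvLoopA]
    have hme : ((k : Int) * d).toNat = d.toNat * k := by
      have hde : d = ((d.toNat : Nat) : Int) := by omega
      rw [hde]
      rw [show (k : Int) * ((d.toNat : Nat) : Int) = ((k * d.toNat : Nat) : Int) by push_cast; ring]
      rw [Int.toNat_natCast, Int.toNat_natCast, Nat.mul_comm]
    rw [hme]
    rw [show ((10 : Int) ^ (d.toNat * k)) = ((10 ^ (d.toNat * k) : Nat) : Int) by push_cast; ring]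
    rw [PySem.Int.mod_natCast, PySem.Int.floordiv_natCast]
    rw [ih (cn % 10 ^ (d.toNat * k)) _ (Nat.mod_lt _ (by positivity))]
    rw [pv_map_range_succ (fun i =>
          ((cn / 10 ^ (d.toNat * (k + 1 - 1 - i)) % 10 ^ d.toNat : Nat) : Int) - 1) k]
    rw [show acc ++ [((cn / 10 ^ (d.toNat * k) : Nat) : Int) - 1] ++
          (List.range k).map (fun i =>
            ((cn % 10 ^ (d.toNat * k) / 10 ^ (d.toNat * (k - 1 - i)) % 10 ^ d.toNat : Nat) : Int) - 1)
        = acc ++ ((((cn / 10 ^ (d.toNat * k) : Nat) : Int) - 1) ::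
            (List.range k).map (fun i =>
              ((cn % 10 ^ (d.toNat * k) / 10 ^ (d.toNat * (k - 1 - i)) % 10 ^ d.toNat : Nat) : Int) - 1)) by
      simp]
    congr 1
    congr 1
    · -- head: the first quotient is already < 10^dn, so the extra % is the identity
      have hq : cn / 10 ^ (d.toNat * k) < 10 ^ d.toNat := by
        rw [Nat.div_lt_iff_lt_mul (by positivity)]
        calc cn < 10 ^ (d.toNat * (k + 1)) := hcn
          _ = 10 ^ d.toNat * 10 ^ (d.toNat * k) := by rw [← pow_add]; congr 1; ring
      rw [show d.toNat * (k + 1 - 1 - 0) = d.toNat * k by norm_num]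
      rw [Nat.mod_eq_of_lt hq]
    · apply List.map_congr_left
      intro i hi
      simp only [List.mem_range] at hi
      congr 2
      rw [show d.toNat * (k + 1 - 1 - (i + 1)) = d.toNat * (k - 1 - i) by congr 1; omega]
      exact pv_mod_pow_div_mod cn (d.toNat * (k - 1 - i)) d.toNat (d.toNat * k)
        (by have h1 : k - 1 - i + 1 ≤ k := by omega
            calc d.toNat * (k - 1 - i) + d.toNat = d.toNat * (k - 1 - i + 1) := by ring
              _ ≤ d.toNat * k := Nat.mul_le_mul_left _ h1)

theorem parse_dem_tiles_eq (dem_code : Int) (dem_tile_digits : Int)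
    (hDom : Dom_parse_dem_tiles dem_code dem_tile_digits)
    (hPre : Pre_parse_dem_tiles dem_code dem_tile_digits) :
    parse_dem_tiles dem_code dem_tile_digits = parse_dem_tiles_alt dem_code dem_tile_digits := by
  rcases hPre with h0 | ⟨hc1, hd1, hlt⟩
  · subst h0; rfl
  · obtain ⟨cn, rfl⟩ : ∃ m : Nat, dem_code = (m : Int) := ⟨dem_code.toNat, by omega⟩
    obtain ⟨dn, rfl⟩ : ∃ m : Nat, dem_tile_digits = (m : Int) := ⟨dem_tile_digits.toNat, by omega⟩
    have hcn1 : 1 ≤ cn := by exact_mod_cast hc1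
    have hdn1 : 1 ≤ dn := by exact_mod_cast hd1
    have hcap : cn ≤ 2147483648 := by
      unfold Dom_parse_dem_tiles pvDomInt at hDom
      simp only [Bool.and_eq_true, decide_eq_true_eq] at hDom
      omega
    have hltn : cn < 10 ^ (4 * dn) := by
      rcases hlt with h10 | hsm
      · have h3 : 3 ≤ dn := by omega
        calc cn ≤ 2147483648 := hcap
          _ < 10 ^ 10 := by norm_num
          _ ≤ 10 ^ (4 * dn) := Nat.pow_le_pow_right (by norm_num) (by omega)
      · have e1 : ((4 * ((dn : Nat) : Int)).toNat) = 4 * dn := by omega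
        rw [e1] at hsm
        exact_mod_cast hsm
    obtain ⟨g, hg⟩ : ∃ g, g = pvNumDigits cn := ⟨_, rfl⟩
    obtain ⟨hgl, hgu⟩ := pvNumDigits_bounds cn hcn1
    rw [← hg] at hgl hgu
    have hg1 : 1 ≤ g := by
      by_contra hcon
      have hz : g = 0 := by omega
      rw [hz, pow_zero] at hgu; omega
    have hg4 : g ≤ 4 * dn := by
      by_contra hcon
      have h1 : 4 * dn ≤ g - 1 := by omega
      have h2 : (10 : Nat) ^ (4 * dn) ≤ 10 ^ (g - 1) := Nat.pow_le_pow_right (by norm_num) h1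
      omega
    obtain ⟨k, hk⟩ : ∃ k, k = (g - 1) / dn := ⟨_, rfl⟩
    have hdm := Nat.div_add_mod (g - 1) dn
    rw [← hk] at hdm
    have hmod : (g - 1) % dn < dn := Nat.mod_lt _ (by omega)
    have hk3 : k ≤ 3 := by
      have h1 : (g - 1) / dn < 4 := (Nat.div_lt_iff_lt_mul (by omega)).mpr (by omega)
      omega
    have hkl : 10 ^ (dn * k) ≤ cn := by
      have h1 : dn * k ≤ g - 1 := by omega
      calc (10 : Nat) ^ (dn * k) ≤ 10 ^ (g - 1) := Nat.pow_le_pow_right (by norm_num) h1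
        _ ≤ cn := hgl
    have hku : cn < 10 ^ (dn * (k + 1)) := by
      have h1 : g ≤ dn * (k + 1) := by
        have h3 : dn * (k + 1) = dn * k + dn := by ring
        omega
      calc cn < 10 ^ g := hgu
        _ ≤ 10 ^ (dn * (k + 1)) := Nat.pow_le_pow_right (by norm_num) h1
    -- evaluate port A
    have hne : ¬ ((cn : Int) = 0) := by omega
    have hnt : PySem.Int.floordiv ((pvNumDigits ((cn : Int)).toNat : Int) - 1) (dn : Int) + 1
        = ((k + 1 : Nat) : Int) := by
      rw [Int.toNat_natCast, ← hg]
      rw [show ((g : Int) - 1) = (((g - 1 : Nat)) : Int) by omega]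
      rw [PySem.Int.floordiv_natCast, ← hk]
      push_cast; ring
    have hA : parse_dem_tiles (cn : Int) (dn : Int)
        = (List.range (k + 1)).map
            (fun i => ((cn / 10 ^ (dn * (k + 1 - 1 - i)) % 10 ^ dn : Nat) : Int) - 1) := by
      rw [parse_dem_tiles, if_neg hne]
      simp only []
      rw [hnt]
      rw [if_neg (by push_cast; omega)]
      have hspec := pvLoopA_spec (dn : Int) (by exact_mod_cast hdn1) (k + 1) cn []
      rw [Int.toNat_natCast] at hspec
      rw [hspec hku]
      simp
    -- evaluate port B
    obtain ⟨w, hw⟩ : ∃ w, w = min dn g := ⟨_, rfl⟩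
    have hw1 : 1 ≤ w := by omega
    have hbz2 : 2 ≤ 10 ^ w := by
      calc (2 : Nat) ≤ 10 ^ 1 := by norm_num
        _ ≤ 10 ^ w := Nat.pow_le_pow_right (by norm_num) hw1
    have hmin : ((min ((dn : Nat) : Int) (pvCountB ((cn : Nat) : Int) 0)).toNat) = w := by
      rw [pvCountB_eq cn 0]
      omega
    have hkl' : (10 ^ w) ^ k ≤ cn := by
      by_cases hdg : dn ≤ g
      · have hwd : w = dn := by omega
        rw [hwd, ← pow_mul]; exact hkl
      · have hk0 : k = 0 := by rw [hk]; exact Nat.div_eq_of_lt (by omega)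
        rw [hk0, pow_zero]; omega
    have hku' : cn < (10 ^ w) ^ (k + 1) := by
      by_cases hdg : dn ≤ g
      · have hwd : w = dn := by omega
        rw [hwd, ← pow_mul]; exact hku
      · have hk0 : k = 0 := by rw [hk]; exact Nat.div_eq_of_lt (by omega)
        have hwg : w = g := by omega
        rw [hk0, hwg, pow_one]; exact hgu
    have hB : parse_dem_tiles_alt (cn : Int) (dn : Int)
        = ((List.range (k + 1)).map
            (fun i => ((cn / (10 ^ w) ^ i % 10 ^ w : Nat) : Int) - 1)).reverse := by
      rw [parse_dem_tiles_alt, if_neg hne]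
      simp only []
      rw [hmin]
      rw [show ((10 : Int) ^ w) = (((10 ^ w : Nat)) : Int) by push_cast; ring]
      rw [pvLoopB_spec (10 ^ w) hbz2 k cn [] hkl' hku']
      rw [List.nil_append]
      rw [if_neg (by simp; omega)]
    rw [hA, hB, pv_reverse_map_range]
    apply List.map_congr_left
    intro i hi
    simp only [List.mem_range] at hi
    by_cases hdg : dn ≤ g
    · have hwd : w = dn := by omega
      rw [hwd]
      congr 3
      rw [← pow_mul]
    · have hk0 : k = 0 := by rw [hk]; exact Nat.div_eq_of_lt (by omega)
      have hi0 : i = 0 := by omega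
      have hwg : w = g := by omega
      have hdnb : cn < 10 ^ dn :=
        lt_of_lt_of_le hgu (Nat.pow_le_pow_right (by norm_num) (by omega))
      have hwb : cn < 10 ^ w := by rw [hwg]; exact hgu
      subst hi0
      rw [hk0]
      norm_num [Nat.mod_eq_of_lt hdnb, Nat.mod_eq_of_lt hwb]

-- ===== VERDICT (by name: the statement is the Claim_ definition above) =====
theorem parse_dem_tiles_spec : Claim_equal_parse_dem_tiles := by
  intro dem_code dem_tile_digits hDom hPre
  unfold Spec_parse_dem_tiles
  exact parse_dem_tiles_eq dem_code dem_tile_digits hDom hPre
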